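-- pv_equiv track=rewrite | github.com/daniel-reich/turbo-robot | MojpPTZYQyN5L2i4a_22.py | cars
-- ===== SOURCE A (Python) =====
-- def cars(wheels, bodies, figures):
--   count = 0
--   while all([wheels > 3, bodies > 0, figures > 1]):
--     wheels -= 4
--     bodies -= 1
--     figures -= 2
--     count += 1
--   return count
-- ===== SOURCE B (Python) =====
-- def cars(wheels, bodies, figures):
--   return max(0, min(wheels // 4, bodies, figures // 2))
-- ===== Notes on version B (the rewrite author's own statement) =====
-- stated objective: faster
-- what changed: Replaces the subtract-4/1/2-per-iteration loop with the closed form max(0, min(wheels//4, bodies, figures//2)).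
import Mathlib
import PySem

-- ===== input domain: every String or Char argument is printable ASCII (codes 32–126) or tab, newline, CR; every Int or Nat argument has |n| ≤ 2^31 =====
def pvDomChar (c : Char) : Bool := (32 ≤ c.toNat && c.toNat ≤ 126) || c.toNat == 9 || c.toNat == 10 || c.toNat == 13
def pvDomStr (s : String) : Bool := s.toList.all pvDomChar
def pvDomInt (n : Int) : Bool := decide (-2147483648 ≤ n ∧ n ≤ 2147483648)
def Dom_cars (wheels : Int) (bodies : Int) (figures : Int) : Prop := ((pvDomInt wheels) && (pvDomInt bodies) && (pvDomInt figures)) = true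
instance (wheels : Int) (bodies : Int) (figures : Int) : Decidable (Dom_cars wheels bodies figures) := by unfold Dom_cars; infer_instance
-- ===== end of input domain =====

-- B replaces A's one-car-per-iteration loop with the closed form max(0, min(wheels//4, bodies, figures//2)); asymptotically faster.


-- ===== PORT A =====
-- A's while loop: each pass subtracts 4/1/2 and bumps count; terminates because bodies strictly decreases while > 0.
def carsLoop (wheels bodies figures count : Int) : Int :=
  if wheels > 3 ∧ bodies > 0 ∧ figures > 1 then
    carsLoop (wheels - 4) (bodies - 1) (figures - 2) (count + 1)
  else count
termination_by bodies.toNat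
decreasing_by omega

def cars (wheels : Int) (bodies : Int) (figures : Int) : Int :=
  carsLoop wheels bodies figures 0

-- ===== PORT B =====
def cars_alt (wheels : Int) (bodies : Int) (figures : Int) : Int :=
  max 0 (min (PySem.Int.floordiv wheels 4) (min bodies (PySem.Int.floordiv figures 2)))

-- ===== PRECONDITION & SPEC =====
def Spec_cars (wheels : Int) (bodies : Int) (figures : Int) (out : Int) : Prop := out = cars_alt wheels bodies figures
instance (wheels : Int) (bodies : Int) (figures : Int) (out : Int) : Decidable (Spec_cars wheels bodies figures out) := by unfold Spec_cars; infer_instance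

-- ===== CLAIM (what is proved, stated in full; the proofs are below) =====
def Claim_equal_cars : Prop := ∀ (wheels : Int) (bodies : Int) (figures : Int), Dom_cars wheels bodies figures → Spec_cars wheels bodies figures (cars wheels bodies figures)

-- ===== LEMMAS AND PROOFS =====

theorem carsLoop_closed (n : ℕ) : ∀ (w b f c : Int), b.toNat = n →
    carsLoop w b f c = c + max 0 (min (PySem.Int.floordiv w 4) (min b (PySem.Int.floordiv f 2))) := by
  induction n using Nat.strong_induction_on with
  | _ n ih =>
    intro w b f c hn
    rw [carsLoop]
    rw [PySem.Int.floordiv_eq_ediv_of_pos (by norm_num : (0:Int) < 4),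
        PySem.Int.floordiv_eq_ediv_of_pos (by norm_num : (0:Int) < 2)]
    split_ifs with h
    · rw [ih (b - 1).toNat (by omega) (w - 4) (b - 1) (f - 2) (c + 1) rfl]
      rw [PySem.Int.floordiv_eq_ediv_of_pos (by norm_num : (0:Int) < 4),
          PySem.Int.floordiv_eq_ediv_of_pos (by norm_num : (0:Int) < 2)]
      omega
    · omega

-- ===== VERDICT (by name: the statement is the Claim_ definition above) =====
theorem cars_spec : Claim_equal_cars := by
  intro w b f _
  unfold Spec_cars cars cars_alt
  simpa using carsLoop_closed b.toNat w b f 0 rfl
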